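-- pv_equiv track=rewrite | github.com/poludennicaa/homework | фибоначи.py | fibonacci_dict
-- ===== SOURCE A (Python) =====
-- def fibonacci_dict(par):
--     my_dict = {}
--     for key in range(par+1):
--         for value in fibonacci_list:
--             if key == 0:
--                 my_dict[key] = []
--             if key > value:
--                 if my_dict.get(key, False) is False:
--                     my_dict[key] = [value]
--                 else:
--                     my_dict[key].append(value)
--
--     return my_dict
--
-- fibonacci_list = [0, 1, 1, 2, 3, 5, 8, 13, 21, 34, 55, 89, 144, 233]
-- ===== SOURCE B (Python) =====
-- fibonacci_list = [0, 1, 1, 2, 3, 5, 8, 13, 21, 34, 55, 89, 144, 233]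
--
--
-- def fibonacci_dict(par):
--     my_dict = {}
--     prefix = []
--     i = 0
--     for key in range(par + 1):
--         while i < len(fibonacci_list) and fibonacci_list[i] < key:
--             prefix.append(fibonacci_list[i])
--             i += 1
--         my_dict[key] = list(prefix)
--     return my_dict
-- ===== Notes on version B (the rewrite author's own statement) =====
-- stated objective: faster
-- what changed: Replaces the per-key rescan of fibonacci_list with dict-presence juggling by a single monotone pointer sweep over the sorted fibonacci_list, copying the running prefix into each key's entry.
import Mathlib
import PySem

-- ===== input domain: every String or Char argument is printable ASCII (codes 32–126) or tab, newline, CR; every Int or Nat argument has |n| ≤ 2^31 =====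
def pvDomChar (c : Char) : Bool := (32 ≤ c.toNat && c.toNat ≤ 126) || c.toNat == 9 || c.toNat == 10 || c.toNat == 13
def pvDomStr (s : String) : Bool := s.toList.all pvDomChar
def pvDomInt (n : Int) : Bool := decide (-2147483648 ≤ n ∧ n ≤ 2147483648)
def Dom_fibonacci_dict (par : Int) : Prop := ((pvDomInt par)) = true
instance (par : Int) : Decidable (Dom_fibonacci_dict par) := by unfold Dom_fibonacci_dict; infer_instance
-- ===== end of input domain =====

-- B replaces A's per-key full rescan of fibonacci_list (with dict-presence juggling)
-- by a single monotone pointer sweep keeping a running prefix; return values proved equal.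

-- module constant shared by both sources
def fibonacci_list : List Int := [0, 1, 1, 2, 3, 5, 8, 13, 21, 34, 55, 89, 144, 233]

-- ===== PORT A =====
-- inner-loop body of A: the key==0 assignment, then the key>value / dict.get(key, False) branching
def fibA_step (key : Int) (my_dict : PySem.Dict Int (List Int)) (value : Int) :
    PySem.Dict Int (List Int) :=
  let my_dict := if key = 0 then my_dict.insert key [] else my_dict
  if value < key then
    match my_dict.get? key with
    | none => my_dict.insert key [value]          -- .get(key, False) is False: key absent
    | some l => my_dict.insert key (l ++ [value]) -- my_dict[key].append(value)
  else my_dict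

def fibonacci_dict (par : Int) : List (Int × List Int) :=
  ((PySem.List.pyRange 0 (par + 1) 1).foldl
    (fun my_dict key => fibonacci_list.foldl (fibA_step key) my_dict)
    PySem.Dict.empty).items

-- ===== PORT B =====
-- the while-loop: advance the pointer (here: the remaining suffix) past values < key
def fibB_advance (pre : List Int) (suf : List Int) (key : Int) : List Int × List Int :=
  match suf with
  | [] => (pre, [])
  | v :: rest => if v < key then fibB_advance (pre ++ [v]) rest key else (pre, v :: rest)

def fibB_step (st : PySem.Dict Int (List Int) × List Int × List Int) (key : Int) :
    PySem.Dict Int (List Int) × List Int × List Int :=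
  let (pre', suf') := fibB_advance st.2.1 st.2.2 key
  (st.1.insert key pre', pre', suf')

def fibonacci_dict_alt (par : Int) : List (Int × List Int) :=
  (((PySem.List.pyRange 0 (par + 1) 1).foldl fibB_step
      (PySem.Dict.empty, [], fibonacci_list)).1).items

-- ===== PRECONDITION & SPEC =====
def Spec_fibonacci_dict (par : Int) (out : List (Int × List Int)) : Prop := out = fibonacci_dict_alt par
instance (par : Int) (out : List (Int × List Int)) : Decidable (Spec_fibonacci_dict par out) := by unfold Spec_fibonacci_dict; infer_instance

-- ===== CLAIM (what is proved, stated in full; the proofs are below) =====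
def Claim_equal_fibonacci_dict : Prop := ∀ (par : Int), Dom_fibonacci_dict par → Spec_fibonacci_dict par (fibonacci_dict par)

-- ===== LEMMAS AND PROOFS =====

-- the dict after processing keys 0..n-1, A's shape (filter) and B's shape (takeWhile)
def fibDF (n : Nat) : PySem.Dict Int (List Int) :=
  PySem.Dict.mk ((List.range n).map
    (fun k => ((k : Int), fibonacci_list.filter (fun v => decide (v < (k : Int))))))

def fibDT (n : Nat) : PySem.Dict Int (List Int) :=
  PySem.Dict.mk ((List.range n).map
    (fun k => ((k : Int), fibonacci_list.takeWhile (fun v => decide (v < (k : Int))))))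

theorem fibDF_get?_fresh (n : Nat) : (fibDF n).get? (n : Int) = none := by
  rw [PySem.Dict.get?_eq_none_iff_not_mem_keys]
  simp [fibDF, PySem.Dict.keys]

theorem fibDT_get?_fresh (n : Nat) : (fibDT n).get? (n : Int) = none := by
  rw [PySem.Dict.get?_eq_none_iff_not_mem_keys]
  simp [fibDT, PySem.Dict.keys]

theorem fibDF_insert (n : Nat) :
    (fibDF n).insert (n : Int) (fibonacci_list.filter (fun v => decide (v < (n : Int)))) =
      fibDF (n + 1) := by
  apply PySem.Dict.ext
  rw [PySem.Dict.items_insert_of_not_contains]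
  · simp [fibDF, List.range_succ]
  · rw [PySem.Dict.contains_eq_isSome_get?, fibDF_get?_fresh]; rfl

theorem fibDT_insert (n : Nat) :
    (fibDT n).insert (n : Int) (fibonacci_list.takeWhile (fun v => decide (v < (n : Int)))) =
      fibDT (n + 1) := by
  apply PySem.Dict.ext
  rw [PySem.Dict.items_insert_of_not_contains]
  · simp [fibDT, List.range_succ]
  · rw [PySem.Dict.contains_eq_isSome_get?, fibDT_get?_fresh]; rfl

-- A's inner loop once my_dict[key] exists: it accumulates the values below key
theorem fibA_inner_acc (key : Int) (hk : key ≠ 0) :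
    ∀ (vs : List Int) (d : PySem.Dict Int (List Int)) (l : List Int),
      vs.foldl (fibA_step key) (d.insert key l) =
        d.insert key (l ++ vs.filter (fun v => decide (v < key))) := by
  intro vs
  induction vs with
  | nil => intro d l; simp
  | cons v rest ih =>
    intro d l
    by_cases hv : v < key
    · simp only [List.foldl_cons, fibA_step, if_neg hk, PySem.Dict.get?_insert_self,
        PySem.Dict.insert_insert_self, List.filter_cons, hv, decide_true, if_true]
      rw [ih d (l ++ [v])]
      simp
    · simp only [List.foldl_cons, fibA_step, if_neg hk, List.filter_cons,
        decide_eq_true_eq, hv, if_false]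
      exact ih d l

-- A's inner loop on a fresh positive key inserts exactly the values below key
theorem fibA_inner_pos (key : Int) (hk : 1 ≤ key) (d : PySem.Dict Int (List Int))
    (hd : d.get? key = none) :
    fibonacci_list.foldl (fibA_step key) d =
      d.insert key (fibonacci_list.filter (fun v => decide (v < key))) := by
  have hk0 : key ≠ 0 := by omega
  have h0 : (0 : Int) < key := by omega
  show (0 :: [1, 1, 2, 3, 5, 8, 13, 21, 34, 55, 89, 144, 233] : List Int).foldl (fibA_step key) d = _
  rw [List.foldl_cons]
  have hstep : fibA_step key d 0 = d.insert key [0] := by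
    simp [fibA_step, if_neg hk0, h0, hd]
  rw [hstep, fibA_inner_acc key hk0]
  have : fibonacci_list.filter (fun v => decide (v < key)) =
      0 :: ([1, 1, 2, 3, 5, 8, 13, 21, 34, 55, 89, 144, 233] : List Int).filter
        (fun v => decide (v < key)) := by
    simp [fibonacci_list, List.filter_cons, h0]
  rw [this]
  rfl

-- A's outer loop over keys 0..n-1 builds the filter dict
theorem fibA_fold (n : Nat) :
    ((List.range n).map (fun k : Nat => (k : Int))).foldl
      (fun my_dict key => fibonacci_list.foldl (fibA_step key) my_dict)
      PySem.Dict.empty = fibDF n := by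
  induction n with
  | zero => rfl
  | succ n ih =>
    simp only [List.range_succ, List.map_append, List.foldl_append]
    rw [ih]
    simp only [List.map_cons, List.map_nil, List.foldl_cons, List.foldl_nil]
    rcases Nat.eq_zero_or_pos n with h0 | hpos
    · subst h0
      decide
    · rw [fibA_inner_pos (n : Int) (by exact_mod_cast hpos) _ (fibDF_get?_fresh n)]
      exact fibDF_insert n

-- B's while-loop is takeWhile/dropWhile
theorem fibB_advance_spec (key : Int) :
    ∀ (suf pre : List Int),
      fibB_advance pre suf key =
        (pre ++ suf.takeWhile (fun v => decide (v < key)),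
         suf.dropWhile (fun v => decide (v < key))) := by
  intro suf
  induction suf with
  | nil => intro pre; simp [fibB_advance]
  | cons v rest ih =>
    intro pre
    by_cases hv : v < key
    · simp [fibB_advance, hv, ih]
    · simp [fibB_advance, hv]

-- two monotone sweeps compose: the second takeWhile/dropWhile bound wins
theorem takeWhile_comp (a b : Int) (hab : a ≤ b) :
    ∀ (l : List Int),
      l.takeWhile (fun v => decide (v < a)) ++
        (l.dropWhile (fun v => decide (v < a))).takeWhile (fun v => decide (v < b)) =
      l.takeWhile (fun v => decide (v < b)) := by
  intro l
  induction l with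
  | nil => simp
  | cons v rest ih =>
    by_cases hv : v < a
    · have hb : v < b := lt_of_lt_of_le hv hab
      simp [hv, hb, ih]
    · simp [hv]

theorem dropWhile_comp (a b : Int) (hab : a ≤ b) :
    ∀ (l : List Int),
      (l.dropWhile (fun v => decide (v < a))).dropWhile (fun v => decide (v < b)) =
      l.dropWhile (fun v => decide (v < b)) := by
  intro l
  induction l with
  | nil => simp
  | cons v rest ih =>
    by_cases hv : v < a
    · have hb : v < b := lt_of_lt_of_le hv hab
      simp [hv, hb, ih]
    · simp [hv]

-- B's outer loop over keys 0..n-1: dict, running prefix and remaining suffix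
theorem fibB_fold (n : Nat) :
    ((List.range n).map (fun k : Nat => (k : Int))).foldl fibB_step
      (PySem.Dict.empty, [], fibonacci_list) =
      (fibDT n,
       fibonacci_list.takeWhile (fun v => decide (v < (n : Int) - 1)),
       fibonacci_list.dropWhile (fun v => decide (v < (n : Int) - 1))) := by
  induction n with
  | zero => decide
  | succ n ih =>
    simp only [List.range_succ, List.map_append, List.foldl_append]
    rw [ih]
    simp only [List.map_cons, List.map_nil, List.foldl_cons, List.foldl_nil]
    have hle : (n : Int) - 1 ≤ (n : Int) := by omega
    rw [fibB_step, fibB_advance_spec]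
    simp only [takeWhile_comp _ _ hle, dropWhile_comp _ _ hle]
    rw [fibDT_insert n]
    have : ((n : Nat) + 1 : Int) - 1 = (n : Int) := by ring
    simp [this]

-- on a sorted list, filtering below a bound is a prefix
theorem filter_eq_takeWhile_sorted (key : Int) :
    ∀ (l : List Int), l.Pairwise (· ≤ ·) →
      l.filter (fun v => decide (v < key)) = l.takeWhile (fun v => decide (v < key)) := by
  intro l
  induction l with
  | nil => intro _; rfl
  | cons v rest ih =>
    intro hp
    rw [List.pairwise_cons] at hp
    by_cases hv : v < key
    · simp [hv, ih hp.2]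
    · simp only [List.filter_cons, List.takeWhile_cons, hv, decide_false]
      simp only [Bool.false_eq_true, if_false]
      rw [List.filter_eq_nil_iff]
      intro x hx
      have := hp.1 x hx
      simp only [decide_eq_true_eq]
      omega

theorem fibDF_eq_fibDT (n : Nat) : fibDF n = fibDT n := by
  unfold fibDF fibDT
  congr 1
  apply List.map_congr_left
  intro k _
  rw [filter_eq_takeWhile_sorted _ fibonacci_list (by decide)]

-- ===== VERDICT (by name: the statement is the Claim_ definition above) =====
theorem fibonacci_dict_spec : Claim_equal_fibonacci_dict := by
  intro par _
  unfold Spec_fibonacci_dict fibonacci_dict fibonacci_dict_alt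
  rw [PySem.List.pyRange_one]
  simp only [zero_add, Int.sub_zero]
  rw [fibA_fold ((par + 1).toNat), fibB_fold ((par + 1).toNat), fibDF_eq_fibDT]
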